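-- pv_equiv track=rewrite | github.com/rtsoliday/medm | tests/testADL_SaveFiles.py | strip_trailing_spaces_in_quotes
-- ===== SOURCE A (Python) =====
-- def strip_trailing_spaces_in_quotes(lines: list[str]) -> list[str]:
--   """Trim trailing whitespace inside quoted attribute values."""
--   result: list[str] = []
--   for line in lines:
--     first = line.find('"')
--     last = line.rfind('"')
--     if first == -1 or last == -1 or last <= first:
--       result.append(line)
--       continue
--     value = line[first + 1:last]
--     trimmed = value.rstrip()
--     if trimmed != value:
--       line = line[:first + 1] + trimmed + line[last:]
--     result.append(line)
--   return result
-- ===== SOURCE B (Python) =====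
-- def strip_trailing_spaces_in_quotes(lines: list[str]) -> list[str]:
--   """Trim trailing whitespace inside quoted attribute values."""
--   def fix(line: str) -> str:
--     rev = line[::-1]
--     n = len(rev)
--     i = 0
--     while i < n and rev[i] != '"':      # walk to the closing quote (last quote of line)
--       i += 1
--     if i == n:
--       return line                       # no quote at all
--     j = i + 1
--     while j < n and rev[j].isspace():   # skip the whitespace just inside it
--       j += 1
--     if '"' not in rev[j:]:
--       return line                       # no opening quote before it
--     return (rev[:i + 1] + rev[j:])[::-1]
--   return [fix(line) for line in lines]
-- ===== Notes on version B (the rewrite author's own statement) =====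
-- stated objective: alternative
-- what changed: B never computes a last-quote index or calls rstrip: it reverses each line, scans forward to the (now first) closing quote, skips the whitespace run just inside it, keeps the tail only if another quote remains, and reverses back.
import Mathlib
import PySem

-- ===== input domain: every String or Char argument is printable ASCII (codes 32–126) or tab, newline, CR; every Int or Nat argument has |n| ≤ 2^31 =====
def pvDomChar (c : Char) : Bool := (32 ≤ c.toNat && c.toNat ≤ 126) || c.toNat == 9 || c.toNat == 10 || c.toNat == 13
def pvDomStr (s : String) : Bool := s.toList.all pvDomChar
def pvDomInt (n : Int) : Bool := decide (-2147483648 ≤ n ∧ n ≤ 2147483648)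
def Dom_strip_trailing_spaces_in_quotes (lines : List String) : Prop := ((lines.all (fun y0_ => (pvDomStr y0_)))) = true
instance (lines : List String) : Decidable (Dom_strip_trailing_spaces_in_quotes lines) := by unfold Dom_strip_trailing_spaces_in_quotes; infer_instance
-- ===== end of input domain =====

-- B replaces A's find/rfind + rstrip + slicing with a single scan over the REVERSED line:
-- walk to the closing quote, skip the whitespace run just inside it, keep the tail only if
-- another quote remains, reverse back (objective: alternative algorithm, same cost).

-- ===== PORT A =====
-- strings are handled as their code-point lists (line.toList) with PySem.Chars primitives,
-- wrapped back with String.ofList; this is exact on the stated domain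
def stripA_fix (line : String) : String :=
  let cs := line.toList
  let first := PySem.Chars.find cs ['"']
  let last := PySem.Chars.rfind cs ['"']
  if first = -1 ∨ last = -1 ∨ last ≤ first then line
  else
    let value := PySem.Chars.slice cs (some (first + 1)) (some last)
    let trimmed := PySem.Chars.rstrip value
    if trimmed ≠ value then
      String.ofList (PySem.Chars.slice cs none (some (first + 1)) ++ trimmed ++
                     PySem.Chars.slice cs (some last) none)
    else line

def strip_trailing_spaces_in_quotes (lines : List String) : List String :=
  lines.foldl (fun result line => result ++ [stripA_fix line]) []

-- ===== PORT B =====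
-- port of B's first while loop: scan the (reversed) code points to the first '"',
-- returning none when there is none, else the chars before it and the chars after it
def revScan : List Char → Option (List Char × List Char)
  | [] => none
  | c :: cs => if c = '"' then some ([], cs)
               else (revScan cs).map (fun p => (c :: p.1, p.2))

def stripB_fix (line : String) : String :=
  let rev := line.toList.reverse
  match revScan rev with
  | none => line                                  -- no quote at all
  | some (pre, rest) =>
    let rest' := rest.dropWhile PySem.Chars.isspace   -- B's second while loop (skip whitespace)
    if '"' ∈ rest' then String.ofList ((pre ++ '"' :: rest').reverse)
    else line                                     -- no opening quote before the closing one

def strip_trailing_spaces_in_quotes_alt (lines : List String) : List String :=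
  lines.map stripB_fix

-- ===== PRECONDITION & SPEC =====
def Spec_strip_trailing_spaces_in_quotes (lines : List String) (out : List String) : Prop := out = strip_trailing_spaces_in_quotes_alt lines
instance (lines : List String) (out : List String) : Decidable (Spec_strip_trailing_spaces_in_quotes lines out) := by unfold Spec_strip_trailing_spaces_in_quotes; infer_instance

-- ===== CLAIM (what is proved, stated in full; the proofs are below) =====
def Claim_equal_strip_trailing_spaces_in_quotes : Prop := ∀ (lines : List String), Dom_strip_trailing_spaces_in_quotes lines → Spec_strip_trailing_spaces_in_quotes lines (strip_trailing_spaces_in_quotes lines)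

-- ===== LEMMAS AND PROOFS =====

lemma revScan_ne_none {cs : List Char} (h : '"' ∈ cs) : revScan cs ≠ none := by
  induction cs with
  | nil => simp at h
  | cons c cs ih =>
    by_cases hc : c = '"'
    · simp [revScan, hc]
    · have hm : '"' ∈ cs := by
        rcases List.mem_cons.mp h with h' | h'
        · exact absurd h'.symm hc
        · exact h'
      simp only [revScan, if_neg hc, ne_eq, Option.map_eq_none_iff]
      exact ih hm

lemma revScan_eq_some {cs : List Char} : ∀ {h t : List Char},
    revScan cs = some (h, t) → cs = h ++ '"' :: t ∧ '"' ∉ h := by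
  induction cs with
  | nil => intro h t hp; simp [revScan] at hp
  | cons c cs ih =>
    intro h t hp
    by_cases hc : c = '"'
    · subst hc
      simp only [revScan, if_pos] at hp
      have hp2 := Option.some.inj hp
      have h1 : ([] : List Char) = h := congrArg Prod.fst hp2
      have h2 : cs = t := congrArg Prod.snd hp2
      subst h1; subst h2
      simp
    · simp only [revScan, if_neg hc, Option.map_eq_some_iff] at hp
      obtain ⟨⟨h', t'⟩, hp', heq⟩ := hp
      simp only [Prod.mk.injEq] at heq
      obtain ⟨h1, h2⟩ := heq
      subst h1; subst h2
      obtain ⟨hcs, hnm⟩ := ih hp'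
      refine ⟨by simp [hcs], ?_⟩
      simp only [List.mem_cons, not_or]
      exact ⟨Ne.symm hc, hnm⟩

-- find on the first-occurrence decomposition
lemma find_go_first (h t : List Char) (hn : '"' ∉ h) (k : Nat) :
    PySem.Chars.find.go ['"'] (h ++ '"' :: t) k = (k : Int) + h.length := by
  induction h generalizing k with
  | nil => simp [PySem.Chars.find.go, List.isPrefixOf]
  | cons c cs ih =>
    simp only [List.mem_cons, not_or] at hn
    have hcq : ('"' == c) = false := by simpa using hn.1
    have hstep : PySem.Chars.find.go ['"'] (c :: (cs ++ '"' :: t)) k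
        = if ['"'].isPrefixOf (c :: (cs ++ '"' :: t)) then (k : Int)
          else PySem.Chars.find.go ['"'] (cs ++ '"' :: t) (k + 1) := rfl
    rw [List.cons_append, hstep, if_neg (by simp [List.isPrefixOf, hcq]), ih hn.2]
    simp only [List.length_cons]
    push_cast
    ring

lemma find_first (h t : List Char) (hn : '"' ∉ h) :
    PySem.Chars.find (h ++ '"' :: t) ['"'] = (h.length : Int) := by
  unfold PySem.Chars.find
  simpa using find_go_first h t hn 0

lemma find_no_quote {cs : List Char} (h : '"' ∉ cs) :
    PySem.Chars.find cs ['"'] = -1 := by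
  rw [PySem.Chars.find_eq_neg_one_iff]
  intro hinf
  exact h ((List.singleton_infix_iff _ _).mp hinf)

lemma isPrefixOf_quote_eq_false {l : List Char} (h : '"' ∉ l) :
    (['"'].isPrefixOf l) = false := by
  cases l with
  | nil => rfl
  | cons c cs =>
    simp only [List.mem_cons, not_or] at h
    have hcq : ('"' == c) = false := by simpa using h.1
    simp [List.isPrefixOf, hcq]

lemma rfind_go_last (m u : List Char) (hu : '"' ∉ u) :
    ∀ j, m.length ≤ j → PySem.Chars.rfind.go (m ++ '"' :: u) ['"'] j = (m.length : Int) := by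
  intro j
  induction j with
  | zero =>
    intro hj
    have hm : m = [] := List.length_eq_zero_iff.mp (Nat.le_zero.mp hj)
    subst hm
    simp [PySem.Chars.rfind.go, List.isPrefixOf]
  | succ j ih =>
    intro hj
    by_cases hje : m.length = j + 1
    · have hdrop : (m ++ '"' :: u).drop (j + 1) = '"' :: u := by
        rw [← hje, List.drop_left]
      simp [PySem.Chars.rfind.go, hdrop, List.isPrefixOf, hje]
    · have hlt : m.length ≤ j := by omega
      have hdrop : (m ++ '"' :: u).drop (j + 1) = u.drop (j - m.length) := by
        rw [List.drop_append, List.drop_eq_nil_of_le (by omega), List.nil_append]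
        have he : j + 1 - m.length = (j - m.length) + 1 := by omega
        rw [he, List.drop_succ_cons]
      have hd : '"' ∉ (m ++ '"' :: u).drop (j + 1) := by
        rw [hdrop]; exact fun hm => hu (List.mem_of_mem_drop hm)
      simp [PySem.Chars.rfind.go, isPrefixOf_quote_eq_false hd, ih hlt]

lemma rfind_last (m u : List Char) (hu : '"' ∉ u) :
    PySem.Chars.rfind (m ++ '"' :: u) ['"'] = (m.length : Int) := by
  unfold PySem.Chars.rfind
  exact rfind_go_last m u hu _ (by simp)

-- rstrip cannot cross a quote: the trailing-whitespace run stops at '"'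
lemma rstrip_append_quote (x y : List Char) :
    PySem.Chars.rstrip (x ++ '"' :: y) = x ++ '"' :: PySem.Chars.rstrip y := by
  unfold PySem.Chars.rstrip
  have hq : PySem.Chars.isspace '"' = false := by decide
  rw [show (x ++ '"' :: y).reverse = y.reverse ++ '"' :: x.reverse by simp,
      show ('"' : Char) :: x.reverse = ['"'] ++ x.reverse by rfl, ← List.append_assoc,
      List.dropWhile_append]
  by_cases he : (List.dropWhile PySem.Chars.isspace (y.reverse ++ ['"'])).isEmpty
  · exfalso
    rw [List.dropWhile_append] at he
    by_cases he2 : (List.dropWhile PySem.Chars.isspace y.reverse).isEmpty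
    · simp [he2, List.dropWhile, hq] at he
    · simp [he2] at he
  · rw [if_neg (by simp [he]), List.dropWhile_append]
    by_cases he2 : (List.dropWhile PySem.Chars.isspace y.reverse).isEmpty
    · have hy : List.dropWhile PySem.Chars.isspace y.reverse = [] := by
        simpa [List.isEmpty_iff] using he2
      simp [hy, List.dropWhile, hq]
    · rw [if_neg he2]
      simp

lemma fix_eq (line : String) : stripA_fix line = stripB_fix line := by
  cases hp : revScan line.toList.reverse with
  | none =>
    have hq : '"' ∉ line.toList := by
      intro hm
      exact revScan_ne_none (by simpa using hm) hp
    simp [stripA_fix, stripB_fix, hp, find_no_quote hq]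
  | some p =>
    obtain ⟨pre, rest⟩ := p
    obtain ⟨hrev, hnpre⟩ := revScan_eq_some hp
    have hcs : line.toList = rest.reverse ++ '"' :: pre.reverse := by
      have := congrArg List.reverse hrev
      simpa using this
    have hnu : '"' ∉ pre.reverse := by simpa using hnpre
    have hrfind : PySem.Chars.rfind line.toList ['"'] = (rest.reverse.length : Int) := by
      rw [hcs]; exact rfind_last _ _ hnu
    by_cases hq2 : '"' ∈ rest.dropWhile PySem.Chars.isspace
    · -- two quotes exist: both rebuild (A only when something was trimmed, but the
      -- untrimmed rebuild equals the line anyway)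
      have hqrest : '"' ∈ rest.reverse := by
        simpa using (List.dropWhile_sublist PySem.Chars.isspace).subset hq2
      obtain ⟨⟨h, v⟩, hpm⟩ := Option.ne_none_iff_exists'.mp (revScan_ne_none hqrest)
      obtain ⟨hm, hnh⟩ := revScan_eq_some hpm
      -- line.toList = h ++ '"' :: v ++ '"' :: pre.reverse
      have hcs2 : line.toList = h ++ '"' :: (v ++ '"' :: pre.reverse) := by
        rw [hcs, hm]; simp
      have hfind : PySem.Chars.find line.toList ['"'] = (h.length : Int) := by
        rw [hcs2]; exact find_first _ _ hnh
      have hL : rest.reverse.length = h.length + 1 + v.length := by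
        rw [hm]; simp; omega
      -- the value between the quotes is v
      have hval : PySem.List.slice line.toList
          (some ((h.length : Int) + 1)) (some (rest.reverse.length : Int)) = v := by
        have h1 : ((h.length : Int) + 1) = ((h.length + 1 : Nat) : Int) := by push_cast; ring
        rw [hcs2, h1, hL]
        rw [show ((h.length + 1 + v.length : Nat) : Int) = ((h.length + 1 + v.length : Nat) : Int) from rfl,
            PySem.List.slice_natCast]
        have heq : h ++ '"' :: (v ++ '"' :: pre.reverse)
            = (h ++ ['"']) ++ (v ++ '"' :: pre.reverse) := by simp
        have hl : h.length + 1 = (h ++ ['"']).length := by simp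
        rw [heq, hl, List.drop_left]
        rw [Nat.add_sub_cancel_left]
        exact List.take_left
      have hpre2 : PySem.List.slice line.toList none (some ((h.length : Int) + 1))
          = h ++ ['"'] := by
        have h1 : ((h.length : Int) + 1) = ((h.length + 1 : Nat) : Int) := by push_cast; ring
        rw [hcs2, h1, PySem.List.slice_to_natCast]
        have heq : h ++ '"' :: (v ++ '"' :: pre.reverse)
            = (h ++ ['"']) ++ (v ++ '"' :: pre.reverse) := by simp
        have hl : h.length + 1 = (h ++ ['"']).length := by simp
        rw [heq, hl, List.take_left]
      have hsuf : PySem.List.slice line.toList (some (rest.reverse.length : Int)) none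
          = '"' :: pre.reverse := by
        rw [hcs, PySem.List.slice_from_natCast, List.drop_left]
      -- B's kept tail is the rstrip of the between-quotes region prefixed by h ++ ['"']
      have hrest' : (rest.dropWhile PySem.Chars.isspace).reverse
          = h ++ '"' :: PySem.Chars.rstrip v := by
        have hx : PySem.Chars.rstrip rest.reverse
            = (rest.dropWhile PySem.Chars.isspace).reverse := by
          unfold PySem.Chars.rstrip
          rw [List.reverse_reverse]
        rw [← hx, hm, rstrip_append_quote]
      have hc1 : ¬((rest.reverse.length : Int) = -1) := by omega
      have hc2 : ¬((rest.reverse.length : Int) ≤ (h.length : Int)) := by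
        rw [hL]; push_cast; omega
      -- compare the two results through their code-point lists
      have key : (stripA_fix line).toList = (stripB_fix line).toList := by
        by_cases htr : PySem.Chars.rstrip v = v
        · simp only [stripA_fix, stripB_fix, PySem.Chars.slice_eq_listSlice,
            hfind, hrfind, hval, hpre2, hsuf, hp]
          rw [if_neg (by push Not; exact ⟨by omega, by omega, lt_of_not_ge hc2⟩),
              if_pos hq2]
          rw [show (pre ++ '"' :: rest.dropWhile PySem.Chars.isspace).reverse
              = (rest.dropWhile PySem.Chars.isspace).reverse ++ '"' :: pre.reverse by simp,
            hrest', htr]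
          simp [hcs2]
        · simp only [stripA_fix, stripB_fix, PySem.Chars.slice_eq_listSlice,
            hfind, hrfind, hval, hpre2, hsuf, hp]
          rw [if_neg (by push Not; exact ⟨by omega, by omega, lt_of_not_ge hc2⟩),
              if_pos (by simpa using htr), if_pos hq2]
          rw [show (pre ++ '"' :: rest.dropWhile PySem.Chars.isspace).reverse
              = (rest.dropWhile PySem.Chars.isspace).reverse ++ '"' :: pre.reverse by simp,
            hrest']
          simp
      calc stripA_fix line = String.ofList (stripA_fix line).toList := by simp
        _ = String.ofList (stripB_fix line).toList := by rw [key]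
        _ = stripB_fix line := by simp
    · -- at most one quote reachable: both keep the line
      have hnm : '"' ∉ rest.reverse := by
        intro hmem
        have hmem' : '"' ∈ rest := by simpa using hmem
        rcases (List.mem_append.mp (by
          rw [List.takeWhile_append_dropWhile]; exact hmem' :
            ('"' : Char) ∈ rest.takeWhile PySem.Chars.isspace
              ++ rest.dropWhile PySem.Chars.isspace)) with hA | hB
        · have := List.mem_takeWhile_imp hA
          simp [PySem.Chars.isspace] at this
        · exact hq2 hB
      have hfind : PySem.Chars.find line.toList ['"'] = (rest.reverse.length : Int) := by
        rw [hcs]; exact find_first _ _ hnm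
      simp [stripA_fix, stripB_fix, hp, hq2, hfind, hrfind]

-- ===== VERDICT (by name: the statement is the Claim_ definition above) =====
theorem strip_trailing_spaces_in_quotes_spec : Claim_equal_strip_trailing_spaces_in_quotes := by
  intro lines _
  unfold Spec_strip_trailing_spaces_in_quotes
  unfold strip_trailing_spaces_in_quotes strip_trailing_spaces_in_quotes_alt
  rw [PySem.List.foldl_append_singleton_eq_map]
  simp [List.map_congr_left (fun l _ => fix_eq l)]
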